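-- pv_equiv track=rewrite | github.com/gyanavardhana/Leetcode-try | 3356-zero-array-transformation-ii/3356-zero-array-transformation-ii.py | check
-- ===== SOURCE A (Python) =====
-- from typing import List
--
-- def check(nums: List[int], queries: List[List[int]], limit: int) -> bool:
--     arr = [0] * (len(nums)+1)
--     for i in range(0, limit):
--         arr[queries[i][0]] -= queries[i][2]
--         arr[queries[i][1]+1]+=queries[i][2]
--
--     dec = 0
--     Sum = 0
--     for i in range(0, len(nums)):
--         dec += arr[i]
--         if nums[i]+dec>0: Sum += nums[i]
--
--     return Sum==0
-- ===== SOURCE B (Python) =====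
-- from typing import List
--
-- def check(nums: List[int], queries: List[List[int]], limit: int) -> bool:
--     total = 0
--     for i, x in enumerate(nums):
--         s = sum(queries[j][2] for j in range(limit)
--                 if queries[j][0] <= i <= queries[j][1])
--         if x - s > 0:
--             total += x
--     return total == 0
-- ===== Notes on version B (the rewrite author's own statement) =====
-- stated objective: alternative
-- what changed: Replaces A's difference-array + running prefix-sum pass with a direct per-position brute force: for each index i it sums queries[j][2] over j in range(limit) whenever queries[j][0] <= i <= queries[j][1], and accumulates nums[i] whenever nums[i] minus that sum is still positive.
-- outside the precondition, e.g. on check([1, 1], [[-1, 1, 1]], 1): A returns False, B returns True; on check([-1, -1], [[2, 0, 2]], 1): A returns False, B returns True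
import Mathlib
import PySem

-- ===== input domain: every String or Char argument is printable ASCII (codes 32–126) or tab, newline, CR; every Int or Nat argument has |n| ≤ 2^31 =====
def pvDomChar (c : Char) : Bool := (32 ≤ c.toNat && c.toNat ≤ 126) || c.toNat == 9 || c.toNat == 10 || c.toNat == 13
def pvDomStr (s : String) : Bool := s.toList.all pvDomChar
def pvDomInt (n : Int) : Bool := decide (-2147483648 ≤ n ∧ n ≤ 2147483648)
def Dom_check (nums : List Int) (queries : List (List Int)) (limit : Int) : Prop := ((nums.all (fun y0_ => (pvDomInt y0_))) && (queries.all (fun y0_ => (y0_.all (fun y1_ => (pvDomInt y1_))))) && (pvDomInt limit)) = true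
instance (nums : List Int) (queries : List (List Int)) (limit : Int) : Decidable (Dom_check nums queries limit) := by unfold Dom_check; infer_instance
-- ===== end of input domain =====

-- B drops A's difference-array/prefix-sum pass for a direct per-position scan of the applied
-- queries (alternative decomposition, not faster); equality of the return value is what is proved.

-- ===== PORT A =====
def check (nums : List Int) (queries : List (List Int)) (limit : Int) : Bool :=
  let arr0 : List Int := List.replicate (nums.length + 1) 0
  let arr := (PySem.List.pyRange 0 limit 1).foldl (fun arr i =>
      let q := PySem.List.pyGetD queries i []
      let arr := PySem.List.pySetD arr (PySem.List.pyGetD q 0 0)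
          (PySem.List.pyGetD arr (PySem.List.pyGetD q 0 0) 0 - PySem.List.pyGetD q 2 0)
      PySem.List.pySetD arr (PySem.List.pyGetD q 1 0 + 1)
          (PySem.List.pyGetD arr (PySem.List.pyGetD q 1 0 + 1) 0 + PySem.List.pyGetD q 2 0)) arr0
  let p := (PySem.List.pyRange 0 (nums.length : Int) 1).foldl (fun (p : Int × Int) i =>
      let dec := p.1 + PySem.List.pyGetD arr i 0
      let Sum := if PySem.List.pyGetD nums i 0 + dec > 0 then p.2 + PySem.List.pyGetD nums i 0 else p.2
      (dec, Sum)) (0, 0)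
  p.2 == 0


-- ===== PORT B =====
def check_alt (nums : List Int) (queries : List (List Int)) (limit : Int) : Bool :=
  let total := (PySem.List.enumerate nums 0).foldl (fun total p =>
      let s := (PySem.List.pyRange 0 limit 1).foldl (fun s j =>
          if PySem.List.pyGetD (PySem.List.pyGetD queries j []) 0 0 ≤ p.1 ∧
             p.1 ≤ PySem.List.pyGetD (PySem.List.pyGetD queries j []) 1 0
          then s + PySem.List.pyGetD (PySem.List.pyGetD queries j []) 2 0 else s) 0
      if p.2 - s > 0 then total + p.2 else total) 0
  total == 0


-- ===== PRECONDITION & SPEC =====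
-- Pre_ restricts to the natural domain of the problem: limit ≤ len(queries) and every applied
-- query [l,r,v] has at least 3 entries and 0 ≤ l ≤ r+1 ≤ len(nums).  Outside it A either raises
-- (IndexError) or returns values produced by Python's negative-index wraparound / negative-limit
-- slicing inside the difference array, which are accidental; B does the natural thing there.
def Pre_check (nums : List Int) (queries : List (List Int)) (limit : Int) : Prop :=
  limit ≤ (queries.length : Int) ∧
  ∀ q ∈ queries.take limit.toNat,
    3 ≤ q.length ∧ 0 ≤ q.getD 0 0 ∧ q.getD 0 0 ≤ q.getD 1 0 + 1 ∧ q.getD 1 0 < (nums.length : Int)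
instance (nums : List Int) (queries : List (List Int)) (limit : Int) : Decidable (Pre_check nums queries limit) := by unfold Pre_check; infer_instance

def pvWitness_check : List Int × List (List Int) × Int := ([1, 2], [[0, 1, 2], [1, 1, 1]], 2)

def Spec_check (nums : List Int) (queries : List (List Int)) (limit : Int) (out : Bool) : Prop := out = check_alt nums queries limit
instance (nums : List Int) (queries : List (List Int)) (limit : Int) (out : Bool) : Decidable (Spec_check nums queries limit out) := by unfold Spec_check; infer_instance

-- ===== CLAIM (what is proved, stated in full; the proofs are below) =====
def Claim_equal_check : Prop := ∀ (nums : List Int) (queries : List (List Int)) (limit : Int), Dom_check nums queries limit → Pre_check nums queries limit → Spec_check nums queries limit (check nums queries limit)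

-- ===== LEMMAS AND PROOFS =====
theorem sum_set_int (l : List Int) (n : Nat) (a : Int) (h : n < l.length) : (l.set n a).sum = l.sum - l.getD n 0 + a := by
  have hl : l = l.take n ++ l.getD n 0 :: l.drop (n+1) := by
    have hg : l.getD n 0 = l[n] := by simp [List.getD_eq_getElem?_getD, List.getElem?_eq_getElem h]
    rw [hg]
    calc l = l.set n l[n] := by simp
    _ = l.take n ++ l[n] :: l.drop (n+1) := List.set_eq_take_cons_drop _ h
  have hs : l.sum = (l.take n ++ l.getD n 0 :: l.drop (n+1)).sum := by rw [← hl]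
  rw [List.set_eq_take_cons_drop a h, hs]
  simp [List.sum_append]; ring

def pre (arr : List Int) (k : Nat) : Int := (arr.take k).sum

theorem pre_set (arr : List Int) (j c : Int) (hj : 0 ≤ j) (hjl : j < (arr.length : Int)) (k : Nat) :
    pre (PySem.List.pySetD arr j (PySem.List.pyGetD arr j 0 + c)) k
      = pre arr k + (if j < (k : Int) then c else 0) := by
  unfold pre
  rw [PySem.List.pySetD_of_nonneg _ _ hj, PySem.List.pyGetD_of_nonneg _ _ hj, List.take_set]
  by_cases hk : j.toNat < k
  · have hlen : j.toNat < (arr.take k).length := by simp; omega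
    rw [sum_set_int _ _ _ hlen]
    have hg : (arr.take k).getD j.toNat 0 = arr.getD j.toNat 0 := by
      simp [List.getD_eq_getElem?_getD, hk]
    rw [hg]
    have : j < (k : Int) := by omega
    simp [this]; ring
  · have hid : (arr.take k).set j.toNat (arr.getD j.toNat 0 + c) = arr.take k := by
      apply List.set_eq_of_length_le; simp; omega
    rw [hid]
    have : ¬ j < (k : Int) := by omega
    simp [this]

def stepQ (arr : List Int) (q : List Int) : List Int :=
  let arr := PySem.List.pySetD arr (PySem.List.pyGetD q 0 0)
      (PySem.List.pyGetD arr (PySem.List.pyGetD q 0 0) 0 - PySem.List.pyGetD q 2 0)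
  PySem.List.pySetD arr (PySem.List.pyGetD q 1 0 + 1)
      (PySem.List.pyGetD arr (PySem.List.pyGetD q 1 0 + 1) 0 + PySem.List.pyGetD q 2 0)

theorem length_stepQ (arr q : List Int) : (stepQ arr q).length = arr.length := by
  simp [stepQ, PySem.List.length_pySetD]

theorem pre_stepQ (arr q : List Int) (i : Int) (hi : 0 ≤ i)
    (h0 : 0 ≤ q.getD 0 0) (h01 : q.getD 0 0 ≤ q.getD 1 0 + 1) (h1 : q.getD 1 0 + 1 < (arr.length : Int)) :
    pre (stepQ arr q) (i.toNat + 1)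
      = pre arr (i.toNat + 1) - (if PySem.List.pyGetD q 0 0 ≤ i ∧ i ≤ PySem.List.pyGetD q 1 0
                                 then PySem.List.pyGetD q 2 0 else 0) := by
  have e0 : PySem.List.pyGetD q 0 0 = q.getD 0 0 := PySem.List.pyGetD_zero q 0
  have e1 : PySem.List.pyGetD q 1 0 = q.getD 1 0 := PySem.List.pyGetD_ofNat' q 1 0
  have e2 : PySem.List.pyGetD q 2 0 = q.getD 2 0 := PySem.List.pyGetD_ofNat' q 2 0
  unfold stepQ
  simp only [e0, e1, e2]
  rw [show PySem.List.pyGetD arr (q.getD 0 0) 0 - q.getD 2 0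
        = PySem.List.pyGetD arr (q.getD 0 0) 0 + (-(q.getD 2 0)) from by ring]
  rw [pre_set _ _ _ (by omega) (by rw [PySem.List.length_pySetD]; omega)]
  rw [pre_set arr _ _ h0 (by omega)]
  split_ifs <;> omega

def decSum (qs : List (List Int)) (i : Int) : Int :=
  (qs.map (fun q =>
    if PySem.List.pyGetD q 0 0 ≤ i ∧ i ≤ PySem.List.pyGetD q 1 0
    then PySem.List.pyGetD q 2 0 else 0)).sum

theorem pre_foldl_stepQ (qs : List (List Int)) (arr : List Int) (n : Nat) (hlen : arr.length = n + 1)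
    (i : Int) (hi0 : 0 ≤ i)
    (hv : ∀ q ∈ qs, 0 ≤ q.getD 0 0 ∧ q.getD 0 0 ≤ q.getD 1 0 + 1 ∧ q.getD 1 0 < (n : Int)) :
    pre (qs.foldl stepQ arr) (i.toNat + 1) = pre arr (i.toNat + 1) - decSum qs i := by
  induction qs generalizing arr with
  | nil => simp [decSum]
  | cons q qs ih =>
    have hq := hv q (by simp)
    rw [List.foldl_cons, ih (stepQ arr q) (by rw [length_stepQ]; exact hlen)
      (fun q hq => hv q (by simp [hq]))]
    rw [pre_stepQ arr q i hi0 hq.1 hq.2.1 (by rw [hlen]; push_cast; omega)]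
    simp [decSum]; ring

theorem pre_replicate_zero (n k : Nat) : pre (List.replicate n (0:Int)) k = 0 := by
  simp [pre, List.take_replicate]

theorem pre_succ (arr : List Int) (k : Nat) : pre arr (k + 1) = pre arr k + arr.getD k 0 := by
  simp [pre, List.take_add_one, List.getD_eq_getElem?_getD]
  cases h : arr[k]? <;> simp

theorem loop2 (arr nums : List Int) (m : Nat) :
    (PySem.List.pyRange 0 (m : Int) 1).foldl (fun (p : Int × Int) i =>
        (p.1 + PySem.List.pyGetD arr i 0,
         if PySem.List.pyGetD nums i 0 + (p.1 + PySem.List.pyGetD arr i 0) > 0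
         then p.2 + PySem.List.pyGetD nums i 0 else p.2)) (0, 0)
      = (pre arr m,
         ((List.range m).map (fun k =>
            if nums.getD k 0 + pre arr (k + 1) > 0 then nums.getD k 0 else 0)).sum) := by
  induction m with
  | zero => simp [pre]
  | succ m ih =>
    have hcast : ((m + 1 : Nat) : Int) = (m : Int) + 1 := by push_cast; ring
    rw [hcast, PySem.List.pyRange_one_succ_right (by positivity), List.foldl_append, ih]
    simp only [List.foldl_cons, List.foldl_nil, List.range_succ, List.map_append, List.sum_append,
      PySem.List.pyGetD_natCast, List.map_cons, List.map_nil, List.sum_cons, List.sum_nil]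
    rw [← pre_succ]
    split_ifs <;> simp

def gsum (qs : List (List Int)) : List Int → Int → Int
  | [], _ => 0
  | x :: xs, s => (if x - decSum qs s > 0 then x else 0) + gsum qs xs (s + 1)

theorem loopB (qs : List (List Int)) (nums : List Int) (s acc : Int) :
    (PySem.List.enumerate nums s).foldl (fun total p =>
        if p.2 - decSum qs p.1 > 0 then total + p.2 else total) acc
      = acc + gsum qs nums s := by
  induction nums generalizing s acc with
  | nil => simp [gsum, PySem.List.enumerate]
  | cons x xs ih =>
    rw [PySem.List.enumerate_cons, List.foldl_cons, ih]
    simp only [gsum]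
    split_ifs <;> ring

theorem gsum_eq (qs : List (List Int)) (nums : List Int) (s : Int) :
    gsum qs nums s
      = ((List.range nums.length).map (fun k =>
          if nums.getD k 0 - decSum qs (s + (k : Int)) > 0 then nums.getD k 0 else 0)).sum := by
  induction nums generalizing s with
  | nil => simp [gsum]
  | cons x xs ih =>
    rw [gsum, ih (s + 1)]
    simp only [List.length_cons, List.range_succ_eq_map, List.map_cons, List.sum_cons, List.map_map]
    congr 1
    · simp
    · apply congrArg List.sum
      apply List.map_congr_left
      intro k hk
      simp only [Function.comp]
      have h1 : (x :: xs).getD (k + 1) 0 = xs.getD k 0 := by simp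
      have h2 : s + ((k : Int) + 1) = s + 1 + (k : Int) := by ring
      simp only [Nat.succ_eq_add_one, h1]
      push_cast
      rw [h2]

theorem foldl_if_add (qs : List (List Int)) (i : Int) (acc : Int) :
    qs.foldl (fun s q =>
        if PySem.List.pyGetD q 0 0 ≤ i ∧ i ≤ PySem.List.pyGetD q 1 0
        then s + PySem.List.pyGetD q 2 0 else s) acc = acc + decSum qs i := by
  induction qs generalizing acc with
  | nil => simp [decSum]
  | cons q qs ih =>
    rw [List.foldl_cons, ih]
    simp [decSum]
    split_ifs <;> ring

theorem check_eq (nums : List Int) (queries : List (List Int)) (limit : Int)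
    (h1 : limit ≤ (queries.length : Int))
    (hq : ∀ q ∈ queries.take limit.toNat,
      3 ≤ q.length ∧ 0 ≤ q.getD 0 0 ∧ q.getD 0 0 ≤ q.getD 1 0 + 1 ∧ q.getD 1 0 < (nums.length : Int)) :
    check nums queries limit = check_alt nums queries limit := by
  set qs := queries.take limit.toNat with hqs
  set n := nums.length with hn
  have htoN : PySem.List.pyRange 0 limit 1 = PySem.List.pyRange 0 ((limit.toNat : Int)) 1 := by
    rw [PySem.List.pyRange_one, PySem.List.pyRange_one]
    congr 2
    omega
  have hqlen : qs.length = limit.toNat := by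
    rw [hqs]; simp [List.length_take]; omega
  have hcast : ((limit.toNat : Int)) = (qs.length : Int) := by rw [hqlen]
  have hget : ∀ j : Int, 0 ≤ j → j < (qs.length : Int) →
      PySem.List.pyGetD queries j [] = PySem.List.pyGetD qs j [] := by
    intro j hj0 hjl
    have hjq : j < (queries.length : Int) := by
      have := List.length_take_le limit.toNat queries
      rw [← hqs] at this; omega
    rw [PySem.List.pyGetD_eq_getElem queries [] hj0 hjq,
        PySem.List.pyGetD_eq_getElem qs [] hj0 (by omega)]
    exact (List.getElem_take).symm
  -- B side: the inner scan of the first `limit` queries is decSum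
  have hinner : ∀ i : Int, (PySem.List.pyRange 0 limit 1).foldl (fun s j =>
      if PySem.List.pyGetD (PySem.List.pyGetD queries j []) 0 0 ≤ i ∧
         i ≤ PySem.List.pyGetD (PySem.List.pyGetD queries j []) 1 0
      then s + PySem.List.pyGetD (PySem.List.pyGetD queries j []) 2 0 else s) 0 = decSum qs i := by
    intro i
    rw [htoN, hcast]
    rw [PySem.List.foldl_congr_mem _ _
      (fun s j => (fun (s : Int) (q : List Int) =>
        if PySem.List.pyGetD q 0 0 ≤ i ∧ i ≤ PySem.List.pyGetD q 1 0
        then s + PySem.List.pyGetD q 2 0 else s) s (PySem.List.pyGetD qs j [])) _ ?_]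
    · have hfl := PySem.List.foldl_pyRange_pyGetD' qs ([] : List Int)
        (fun (s : Int) (q : List Int) =>
          if PySem.List.pyGetD q 0 0 ≤ i ∧ i ≤ PySem.List.pyGetD q 1 0
          then s + PySem.List.pyGetD q 2 0 else s) (0 : Int) (le_refl (0 : Int))
      rw [hfl]
      simp only [Int.toNat_zero, List.drop_zero]
      rw [foldl_if_add]
      ring
    · intro acc j hj
      rw [PySem.List.mem_pyRange_one] at hj
      simp only [hget j hj.1 hj.2]
  have hB : check_alt nums queries limit
      = (((List.range n).map (fun k =>
          if nums.getD k 0 - decSum qs (0 + (k : Int)) > 0 then nums.getD k 0 else 0)).sum == 0) := by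
    have hfun : (fun (total : Int) (p : Int × Int) =>
        let s := (PySem.List.pyRange 0 limit 1).foldl (fun s j =>
            if PySem.List.pyGetD (PySem.List.pyGetD queries j []) 0 0 ≤ p.1 ∧
               p.1 ≤ PySem.List.pyGetD (PySem.List.pyGetD queries j []) 1 0
            then s + PySem.List.pyGetD (PySem.List.pyGetD queries j []) 2 0 else s) 0
        if p.2 - s > 0 then total + p.2 else total)
        = (fun (total : Int) (p : Int × Int) =>
            if p.2 - decSum qs p.1 > 0 then total + p.2 else total) := by
      funext total p
      simp only [hinner p.1]
    show ((PySem.List.enumerate nums 0).foldl (fun (total : Int) (p : Int × Int) =>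
        let s := (PySem.List.pyRange 0 limit 1).foldl (fun s j =>
            if PySem.List.pyGetD (PySem.List.pyGetD queries j []) 0 0 ≤ p.1 ∧
               p.1 ≤ PySem.List.pyGetD (PySem.List.pyGetD queries j []) 1 0
            then s + PySem.List.pyGetD (PySem.List.pyGetD queries j []) 2 0 else s) 0
        if p.2 - s > 0 then total + p.2 else total) 0 == 0) = _
    rw [hfun, loopB, gsum_eq]
    simp [hn]
  -- A side: the difference array is qs.foldl stepQ arr0
  have harr : (PySem.List.pyRange 0 limit 1).foldl (fun arr i =>
      let q := PySem.List.pyGetD queries i []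
      let arr := PySem.List.pySetD arr (PySem.List.pyGetD q 0 0)
          (PySem.List.pyGetD arr (PySem.List.pyGetD q 0 0) 0 - PySem.List.pyGetD q 2 0)
      PySem.List.pySetD arr (PySem.List.pyGetD q 1 0 + 1)
          (PySem.List.pyGetD arr (PySem.List.pyGetD q 1 0 + 1) 0 + PySem.List.pyGetD q 2 0))
      (List.replicate (n + 1) (0:Int))
      = qs.foldl stepQ (List.replicate (n + 1) (0:Int)) := by
    rw [htoN, hcast]
    rw [PySem.List.foldl_congr_mem _ _
      (fun arr i => stepQ arr (PySem.List.pyGetD qs i [])) _ ?_]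
    · rw [PySem.List.foldl_pyRange_pyGetD' qs [] stepQ _ le_rfl]
      simp
    · intro acc i hi
      rw [PySem.List.mem_pyRange_one] at hi
      simp only [hget i hi.1 hi.2]
      rfl
  -- A side result
  have hA : check nums queries limit
      = (((PySem.List.pyRange 0 (n : Int) 1).foldl (fun (p : Int × Int) i =>
        (p.1 + PySem.List.pyGetD ((PySem.List.pyRange 0 limit 1).foldl (fun arr i =>
            let q := PySem.List.pyGetD queries i []
            let arr := PySem.List.pySetD arr (PySem.List.pyGetD q 0 0)
                (PySem.List.pyGetD arr (PySem.List.pyGetD q 0 0) 0 - PySem.List.pyGetD q 2 0)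
            PySem.List.pySetD arr (PySem.List.pyGetD q 1 0 + 1)
                (PySem.List.pyGetD arr (PySem.List.pyGetD q 1 0 + 1) 0 + PySem.List.pyGetD q 2 0))
            (List.replicate (n + 1) (0:Int))) i 0,
         if PySem.List.pyGetD nums i 0 + (p.1 + PySem.List.pyGetD ((PySem.List.pyRange 0 limit 1).foldl (fun arr i =>
            let q := PySem.List.pyGetD queries i []
            let arr := PySem.List.pySetD arr (PySem.List.pyGetD q 0 0)
                (PySem.List.pyGetD arr (PySem.List.pyGetD q 0 0) 0 - PySem.List.pyGetD q 2 0)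
            PySem.List.pySetD arr (PySem.List.pyGetD q 1 0 + 1)
                (PySem.List.pyGetD arr (PySem.List.pyGetD q 1 0 + 1) 0 + PySem.List.pyGetD q 2 0))
            (List.replicate (n + 1) (0:Int))) i 0) > 0
         then p.2 + PySem.List.pyGetD nums i 0 else p.2)) (0, 0)).2 == 0) := rfl
  rw [hA, harr, loop2, hB]
  congr 1
  apply congrArg List.sum
  apply List.map_congr_left
  intro k hk
  rw [List.mem_range] at hk
  have hpre : pre ((qs.foldl stepQ (List.replicate (n + 1) (0:Int)))) (k + 1) = 0 - decSum qs (k : Int) := by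
    have := pre_foldl_stepQ qs (List.replicate (n + 1) (0:Int)) n (by simp) (k : Int) (by positivity)
      (fun q hmem => ⟨(hq q hmem).2.1, (hq q hmem).2.2.1, (hq q hmem).2.2.2⟩)
    simp only [Int.toNat_natCast] at this
    rw [this, pre_replicate_zero]
  rw [hpre]
  have h2 : (0:Int) + (k:Int) = (k:Int) := by ring
  rw [h2]
  have h3 : nums.getD k 0 + (0 - decSum qs (k:Int)) = nums.getD k 0 - decSum qs (k:Int) := by ring
  rw [h3]

-- ===== VERDICT (by name: the statement is the Claim_ definition above) =====
theorem check_spec : Claim_equal_check := by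
  intro nums queries limit _ hpre
  unfold Pre_check at hpre
  unfold Spec_check
  exact check_eq nums queries limit hpre.1 hpre.2
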